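-- pv_equiv track=rewrite | github.com/ttcdt/pygruta | pygruta/base.py | is_subset_of
-- ===== SOURCE A (Python) =====
-- def is_subset_of(subset, superset):
--     cnt = 0
--
--     for e in subset:
--         # if e starts with !, it's an element
--         # that must *not* be in the superset
--         if e[0] == "!":
--             if e[1:] in superset:
--                 cnt = 0
--                 break
--             else:
--                 cnt += 1
--         elif e in superset:
--             cnt += 1
--
--     return bool(cnt and cnt == len(subset))
-- ===== SOURCE B (Python) =====
-- def is_subset_of(subset, superset):
--     sup = set(superset)
--     pos = {e for e in subset if e[:1] != "!"}
--     neg = {e[1:] for e in subset if e[:1] == "!"}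
--     return bool(subset) and pos <= sup and neg.isdisjoint(sup)
-- ===== Notes on version B (the rewrite author's own statement) =====
-- stated objective: faster
-- what changed: Replaces the single counting loop with early break (linear superset scan per element) by a partition of the subset into positive and negated groups decided with set algebra (pos <= sup, neg.isdisjoint(sup)) over a hashed superset.
import Mathlib
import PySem

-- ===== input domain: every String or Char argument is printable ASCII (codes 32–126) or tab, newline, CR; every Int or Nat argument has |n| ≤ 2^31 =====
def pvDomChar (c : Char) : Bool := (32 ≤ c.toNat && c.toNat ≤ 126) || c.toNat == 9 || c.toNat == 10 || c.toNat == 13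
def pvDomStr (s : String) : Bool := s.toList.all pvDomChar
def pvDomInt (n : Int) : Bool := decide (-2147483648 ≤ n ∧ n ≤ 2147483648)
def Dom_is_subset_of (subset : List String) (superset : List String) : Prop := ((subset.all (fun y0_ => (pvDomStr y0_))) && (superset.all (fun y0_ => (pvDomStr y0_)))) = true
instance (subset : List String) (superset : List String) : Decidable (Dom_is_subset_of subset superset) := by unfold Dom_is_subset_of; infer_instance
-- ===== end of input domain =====

-- B replaces A's counting loop (with early break) by a partition of the subset into
-- positive / negated groups decided with set algebra over a hashed superset.

-- ===== PORT A =====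
-- the 'for e in subset' loop carrying cnt; the 'break' returns 0 immediately
def isSubLoop (superset : List String) : List String → Nat → Nat
  | [], cnt => cnt
  | e :: rest, cnt =>
    if PySem.Str.pyGet? e 0 = some '!' then
      if superset.contains (PySem.Str.slice e (some 1) none) then 0
      else isSubLoop superset rest (cnt + 1)
    else if superset.contains e then isSubLoop superset rest (cnt + 1)
    else isSubLoop superset rest cnt

def is_subset_of (subset : List String) (superset : List String) : Bool :=
  let cnt := isSubLoop superset subset 0
  !(cnt == 0) && (cnt == subset.length)

-- ===== PORT B =====
def is_subset_of_alt (subset : List String) (superset : List String) : Bool :=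
  let sup : PySem.Set String := PySem.Set.ofList superset
  let pos : PySem.Set String :=
    PySem.Set.ofList (subset.filter (fun e => !(PySem.Str.slice e none (some 1) == "!")))
  let neg : PySem.Set String :=
    PySem.Set.ofList ((subset.filter (fun e => PySem.Str.slice e none (some 1) == "!")).map
      (fun e => PySem.Str.slice e (some 1) none))
  !subset.isEmpty && PySem.Set.issubset pos sup && PySem.Set.isdisjoint neg sup

-- ===== PRECONDITION & SPEC =====
-- an element on which A's loop breaks: starts with '!' and its tail is in superset
def brkElem (superset : List String) (e : String) : Bool :=
  (PySem.Str.pyGet? e 0 == some '!') && superset.contains (PySem.Str.slice e (some 1) none)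

-- Pre_ excludes exactly the inputs where Python A raises IndexError: an empty string
-- in subset that the loop reaches, i.e. not preceded by a breaking negated element.
def Pre_is_subset_of (subset : List String) (superset : List String) : Prop :=
  "" ∉ subset.takeWhile (fun e => !brkElem superset e)
instance (subset : List String) (superset : List String) : Decidable (Pre_is_subset_of subset superset) := by unfold Pre_is_subset_of; infer_instance

def pvWitness_is_subset_of : List String × List String := (["a", "!b"], ["a", "c"])

def Spec_is_subset_of (subset : List String) (superset : List String) (out : Bool) : Prop := out = is_subset_of_alt subset superset
instance (subset : List String) (superset : List String) (out : Bool) : Decidable (Spec_is_subset_of subset superset out) := by unfold Spec_is_subset_of; infer_instance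

-- ===== CLAIM (what is proved, stated in full; the proofs are below) =====
def Claim_equal_is_subset_of : Prop := ∀ (subset : List String) (superset : List String), Dom_is_subset_of subset superset → Pre_is_subset_of subset superset → Spec_is_subset_of subset superset (is_subset_of subset superset)

-- ===== LEMMAS AND PROOFS =====

-- the per-element condition A checks
def goodElem (superset : List String) (e : String) : Bool :=
  if PySem.Str.pyGet? e 0 = some '!' then
    !(superset.contains (PySem.Str.slice e (some 1) none))
  else superset.contains e

-- B's e[:1] == "!" test agrees with A's e[0] == '!' test on every string
theorem bang_test (e : String) :
    (PySem.Str.slice e none (some 1) == "!") = (PySem.Str.pyGet? e 0 == some '!') := by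
  have h1 : (PySem.Str.slice e none (some 1)).toList = e.toList.take 1 := by
    rw [PySem.Str.toList_slice]
    exact PySem.List.slice_to_natCast (xs := e.toList) (b := 1)
  have h2 : PySem.Str.pyGet? e 0 = e.toList[(0:Nat)]? := by
    simpa using PySem.Str.pyGet?_natCast (s := e) (n := 0)
  apply Bool.eq_iff_iff.mpr
  simp only [beq_iff_eq, ← String.toList_inj, h1, h2]
  cases e.toList with
  | nil => simp
  | cons c rest =>
      have : ("!" : String).toList = ['!'] := rfl
      rw [this]
      simp [List.take]

theorem isSubLoop_all_good (ss : List String) (l : List String) (c : Nat)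
    (h : ∀ e ∈ l, goodElem ss e = true) : isSubLoop ss l c = c + l.length := by
  induction l generalizing c with
  | nil => simp [isSubLoop]
  | cons e rest ih =>
    have he := h e (by simp)
    have hrest : ∀ x ∈ rest, goodElem ss x = true := fun x hx => h x (by simp [hx])
    unfold goodElem at he
    simp only [isSubLoop]
    split_ifs with h1 h2 h3
    · rw [if_pos h1, h2] at he; simp at he
    · rw [ih _ hrest]; simp [List.length_cons]; omega
    · rw [ih _ hrest]; simp [List.length_cons]; omega
    · rw [if_neg h1] at he; exact absurd he h3

theorem isSubLoop_not_all_good (ss : List String) (l : List String) (c : Nat)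
    (h : ¬ ∀ e ∈ l, goodElem ss e = true) :
    isSubLoop ss l c < c + l.length ∨ isSubLoop ss l c = 0 := by
  induction l generalizing c with
  | nil => exact absurd (by simp) h
  | cons e rest ih =>
    simp only [isSubLoop]
    by_cases hrest : ∀ x ∈ rest, goodElem ss x = true
    · have he : goodElem ss e = false := by
        by_contra hc
        refine h ?_
        intro x hx
        rcases List.mem_cons.mp hx with rfl | hx
        · exact Bool.ne_false_iff.mp hc
        · exact hrest x hx
      unfold goodElem at he
      split_ifs with h1 h2 h3
      · right; rfl
      · rw [if_pos h1, Bool.not_eq_false'] at he; exact absurd he h2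
      · rw [if_neg h1] at he; rw [he] at h3; simp at h3
      · left; rw [isSubLoop_all_good ss rest c hrest]; simp [List.length_cons]
    · split_ifs with h1 h2 h3
      · right; rfl
      · rcases ih (c + 1) hrest with hl | hl
        · left; simp only [List.length_cons]; omega
        · right; exact hl
      · rcases ih (c + 1) hrest with hl | hl
        · left; simp only [List.length_cons]; omega
        · right; exact hl
      · rcases ih c hrest with hl | hl
        · left; simp only [List.length_cons]; omega
        · right; exact hl

theorem bool_eq_of_iff {x y : Bool} (h : x = true ↔ y = true) : x = y := by
  cases x <;> cases y <;> simp_all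

theorem alt_eq_all (subset superset : List String) :
    is_subset_of_alt subset superset =
      (!subset.isEmpty && subset.all (goodElem superset)) := by
  apply bool_eq_of_iff
  simp only [is_subset_of_alt, bang_test, Bool.and_eq_true, PySem.Set.issubset_iff,
    PySem.Set.isdisjoint_iff, PySem.Set.mem_ofList, List.mem_filter, List.mem_map,
    List.all_eq_true, goodElem]
  constructor
  · rintro ⟨⟨hne, hsub⟩, hdis⟩
    refine ⟨hne, fun e he => ?_⟩
    by_cases h1 : PySem.Str.pyGet? e 0 = some '!'
    · rw [if_pos h1, Bool.not_eq_true', ← Bool.not_eq_true, List.contains_iff_mem]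
      intro hc
      exact hdis _ ⟨e, ⟨he, by rw [beq_iff_eq]; exact h1⟩, rfl⟩ hc
    · rw [if_neg h1, List.contains_iff_mem]
      exact hsub e ⟨he, by simp only [Bool.not_eq_eq_eq_not, Bool.not_true, beq_eq_false_iff_ne, ne_eq]; exact h1⟩
  · rintro ⟨hne, hall⟩
    refine ⟨⟨hne, fun e hep => ?_⟩, ?_⟩
    · obtain ⟨he, hp⟩ := hep
      have hg := hall e he
      simp only [Bool.not_eq_eq_eq_not, Bool.not_true, beq_eq_false_iff_ne, ne_eq] at hp
      rw [if_neg hp, List.contains_iff_mem] at hg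
      exact hg
    · rintro x ⟨e, ⟨he, hp⟩, rfl⟩ hx
      have hg := hall e he
      rw [beq_iff_eq] at hp
      rw [if_pos hp, Bool.not_eq_true', ← Bool.not_eq_true, List.contains_iff_mem] at hg
      exact hg hx

-- ===== VERDICT (by name: the statement is the Claim_ definition above) =====
theorem is_subset_of_spec : Claim_equal_is_subset_of := by
  intro subset superset _ _
  unfold Spec_is_subset_of
  rw [alt_eq_all]
  simp only [is_subset_of]
  by_cases hall : ∀ e ∈ subset, goodElem superset e = true
  · rw [isSubLoop_all_good superset subset 0 hall]
    have : subset.all (goodElem superset) = true := List.all_eq_true.mpr hall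
    rw [this]
    cases subset <;> simp
  · have : subset.all (goodElem superset) = false := by
      rw [← Bool.not_eq_true, List.all_eq_true]; exact hall
    rw [this, Bool.and_false]
    rcases isSubLoop_not_all_good superset subset 0 hall with h | h
    · simp only [Nat.zero_add] at h
      have : (isSubLoop superset subset 0 == subset.length) = false := by
        simp; omega
      rw [this, Bool.and_false]
    · rw [h]; simp
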